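-- pv_equiv track=rewrite | github.com/Alankvuong/CS10 | HW4/HW4_PS1_vuong_a.py | evenToFront
-- ===== SOURCE A (Python) =====
-- def evenToFront(data:list)->list:
-- 	'''This moves the even numbers to the front of the list'''
-- 	dataList_length = len(data)
--
-- 	evensList = []
-- 	oddsList = []
--
-- 	for i in range(0, dataList_length):
-- 		if data[i] % 2 == 0:
-- 			evensList.append(data[i])
-- 		elif data[i] % 2 != 0:
-- 			oddsList.append(data[i])
--
-- 	for i in range(0, len(oddsList)):
-- 		evensList.append(oddsList[i])
--
-- 	for i in range(len(data)):
-- 		data[i] = evensList[i]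
--
-- 	return data
-- ===== SOURCE B (Python) =====
-- def evenToFront(data: list) -> list:
--     '''Moves even numbers to the front, preserving relative order (stable parity sort).'''
--     data.sort(key=lambda x: x % 2 != 0)
--     return data
-- ===== Notes on version B (the rewrite author's own statement) =====
-- stated objective: idiomatic
-- what changed: Replaced the three explicit index loops (partition into two lists, concatenate, write back) with a single in-place stable sort keyed by parity; stability keeps each group's relative order, matching A's partition.
import Mathlib
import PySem

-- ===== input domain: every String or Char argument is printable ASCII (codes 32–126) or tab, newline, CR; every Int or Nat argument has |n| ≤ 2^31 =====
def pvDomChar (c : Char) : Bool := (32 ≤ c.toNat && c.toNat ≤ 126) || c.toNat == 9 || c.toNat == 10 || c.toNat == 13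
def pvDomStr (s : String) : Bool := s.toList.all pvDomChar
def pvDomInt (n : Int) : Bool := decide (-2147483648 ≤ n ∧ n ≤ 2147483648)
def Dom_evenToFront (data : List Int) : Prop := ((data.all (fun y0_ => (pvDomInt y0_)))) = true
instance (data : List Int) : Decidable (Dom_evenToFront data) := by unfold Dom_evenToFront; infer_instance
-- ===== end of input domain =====

-- B replaces A's three index loops by one in-place stable parity-keyed sort (idiomatic; same return value;
-- both A and B mutate `data` in place the same way, the theorems are about the return value).

-- ===== PORT A =====
def evenToFront (data : List Int) : List Int :=
  let dataListLength : Int := data.length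
  -- first loop: partition into evensList / oddsList
  let pair := (PySem.List.pyRange 0 dataListLength 1).foldl
    (fun (st : List Int × List Int) i =>
      let x := PySem.List.pyGetD data i 0
      if PySem.Int.mod x 2 = 0 then (st.1 ++ [x], st.2)
      else if PySem.Int.mod x 2 ≠ 0 then (st.1, st.2 ++ [x])
      else st)
    ([], [])
  -- second loop: append oddsList onto evensList
  let evensList := (PySem.List.pyRange 0 (pair.2.length : Int) 1).foldl
    (fun acc i => acc ++ [PySem.List.pyGetD pair.2 i 0]) pair.1
  -- third loop: data[i] = evensList[i] for i in range(len(data)); the returned data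
  (PySem.List.pyRange 0 ((data.length : Int)) 1).map (fun i => PySem.List.pyGetD evensList i 0)

-- ===== PORT B =====
def evenToFront_alt (data : List Int) : List Int :=
  PySem.List.sorted data (fun x => PySem.Int.mod x 2 != 0) false

-- ===== PRECONDITION & SPEC =====
def Spec_evenToFront (data : List Int) (out : List Int) : Prop := out = evenToFront_alt data
instance (data : List Int) (out : List Int) : Decidable (Spec_evenToFront data out) := by unfold Spec_evenToFront; infer_instance

-- ===== CLAIM (what is proved, stated in full; the proofs are below) =====
def Claim_equal_evenToFront : Prop := ∀ (data : List Int), Dom_evenToFront data → Spec_evenToFront data (evenToFront data)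

-- ===== LEMMAS AND PROOFS =====

-- parity key used by B
def pvKey (x : Int) : Bool := PySem.Int.mod x 2 != 0

-- sorted's comparison on Bool keys, in normalized form
lemma pv_before_eq :
    (fun a b => decide (pvKey a < pvKey b)) = (fun a b => !pvKey a && pvKey b) := by
  funext a b
  cases pvKey a <;> cases pvKey b <;> decide

-- inserting into a (false-keys ++ true-keys) list keeps that shape, stably
lemma pv_insert_shape (x : Int) (E O : List Int)
    (hE : ∀ a ∈ E, pvKey a = false) (hO : ∀ a ∈ O, pvKey a = true) :
    PySem.List.insertBy (fun a b => !pvKey a && pvKey b) x (E ++ O)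
      = if pvKey x then E ++ O ++ [x] else E ++ x :: O := by
  induction E with
  | nil =>
    induction O with
    | nil => cases hx : pvKey x <;> simp [PySem.List.insertBy]
    | cons y ys ih =>
      have hy : pvKey y = true := hO y (by simp)
      have hys : ∀ a ∈ ys, pvKey a = true := fun a ha => hO a (by simp [ha])
      have ih' := ih hys
      cases hx : pvKey x with
      | false => simp [PySem.List.insertBy, hy, hx]
      | true =>
        rw [hx] at ih'
        simp only [List.nil_append] at ih' ⊢
        simp [PySem.List.insertBy, hy, hx, ih']
  | cons e E' ih =>
    have he : pvKey e = false := hE e (by simp)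
    have hE' : ∀ a ∈ E', pvKey a = false := fun a ha => hE a (by simp [ha])
    have ih' := ih hE'
    cases hx : pvKey x with
    | false =>
      rw [hx] at ih'
      rw [if_neg (by simp)] at ih'
      simp [PySem.List.insertBy, he, hx, ih']
    | true =>
      rw [hx, if_pos rfl] at ih'
      simp [PySem.List.insertBy, he, hx, ih']

-- the insertion-sort fold partitions stably
lemma pv_fold_partition (xs : List Int) : ∀ (E O : List Int),
    (∀ a ∈ E, pvKey a = false) → (∀ a ∈ O, pvKey a = true) →
    xs.foldl (fun acc x => PySem.List.insertBy (fun a b => !pvKey a && pvKey b) x acc) (E ++ O)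
      = (E ++ xs.filter (fun x => !pvKey x)) ++ (O ++ xs.filter pvKey) := by
  induction xs with
  | nil => intro E O _ _; simp
  | cons x xs ih =>
    intro E O hE hO
    simp only [List.foldl_cons]
    rw [pv_insert_shape x E O hE hO]
    cases hx : pvKey x with
    | false =>
      have hEx : ∀ a ∈ E ++ [x], pvKey a = false := by
        intro a ha
        rcases List.mem_append.mp ha with h | h
        · exact hE a h
        · simp at h; rw [h]; exact hx
      rw [if_neg (by simp), show E ++ x :: O = (E ++ [x]) ++ O by simp,
        ih (E ++ [x]) O hEx hO]
      simp [hx]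
    | true =>
      have hOx : ∀ a ∈ O ++ [x], pvKey a = true := by
        intro a ha
        rcases List.mem_append.mp ha with h | h
        · exact hO a h
        · simp at h; rw [h]; exact hx
      rw [if_pos (by simp), show E ++ O ++ [x] = E ++ (O ++ [x]) by simp,
        ih E (O ++ [x]) hE hOx]
      simp [hx]

lemma pv_alt_eq (data : List Int) :
    evenToFront_alt data = data.filter (fun x => !pvKey x) ++ data.filter pvKey := by
  show data.foldl
      (fun acc x => PySem.List.insertBy (fun a b => decide (pvKey a < pvKey b)) x acc) []
    = _
  rw [pv_before_eq]
  have h := pv_fold_partition data [] [] (by simp) (by simp)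
  simpa only [List.nil_append] using h

-- A's partition loop, over an arbitrary accumulator pair
lemma pv_pair (xs : List Int) : ∀ (E O : List Int),
    xs.foldl
      (fun (st : List Int × List Int) x =>
        if PySem.Int.mod x 2 = 0 then (st.1 ++ [x], st.2)
        else if PySem.Int.mod x 2 ≠ 0 then (st.1, st.2 ++ [x]) else st)
      (E, O)
      = (E ++ xs.filter (fun x => !pvKey x), O ++ xs.filter pvKey) := by
  induction xs with
  | nil => intro E O; simp
  | cons x xs ih =>
    intro E O
    rw [List.foldl_cons]
    by_cases hx : PySem.Int.mod x 2 = 0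
    · have hk : pvKey x = false := by unfold pvKey; rw [hx]; rfl
      have hstep : (if PySem.Int.mod x 2 = 0 then ((E, O).1 ++ [x], (E, O).2)
          else if PySem.Int.mod x 2 ≠ 0 then ((E, O).1, (E, O).2 ++ [x]) else (E, O))
          = (E ++ [x], O) := by rw [if_pos hx]
      rw [hstep, ih (E ++ [x]) O]
      simp [hk]
    · have hk : pvKey x = true := by unfold pvKey; exact bne_iff_ne.mpr hx
      have hstep : (if PySem.Int.mod x 2 = 0 then ((E, O).1 ++ [x], (E, O).2)
          else if PySem.Int.mod x 2 ≠ 0 then ((E, O).1, (E, O).2 ++ [x]) else (E, O))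
          = (E, O ++ [x]) := by rw [if_neg hx, if_pos hx]
      rw [hstep, ih E (O ++ [x])]
      simp [hk]

lemma pv_a_eq (data : List Int) :
    evenToFront data = data.filter (fun x => !pvKey x) ++ data.filter pvKey := by
  unfold evenToFront
  have h1 := PySem.List.foldl_pyRange_zero_pyGetD' data 0
    (fun (st : List Int × List Int) x =>
      if PySem.Int.mod x 2 = 0 then (st.1 ++ [x], st.2)
      else if PySem.Int.mod x 2 ≠ 0 then (st.1, st.2 ++ [x]) else st) ([], [])
  simp only [h1]
  have hpair := pv_pair data [] []
  simp only [List.nil_append] at hpair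
  rw [hpair]
  have h2 := PySem.List.foldl_pyRange_zero_pyGetD' (data.filter pvKey) 0
    (fun (acc : List Int) y => acc ++ [y]) (data.filter (fun x => !pvKey x))
  simp only [h2, PySem.List.foldl_append_singleton]
  have hlen : ((data.filter (fun x => !pvKey x) ++ data.filter pvKey).length : Int)
      = (data.length : Int) := by
    simp only [List.length_append]
    have := List.length_eq_length_filter_add (l := data) pvKey
    have hf : data.filter (fun x => (!pvKey x)) = data.filter (fun x => !pvKey x) := rfl
    omega
  rw [← hlen, PySem.List.map_pyGetD_pyRange_zero']

-- ===== VERDICT (by name: the statement is the Claim_ definition above) =====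
theorem evenToFront_spec : Claim_equal_evenToFront := by
  intro data _
  unfold Spec_evenToFront
  rw [pv_a_eq, pv_alt_eq]
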